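-- pv_equiv track=rewrite | github.com/olexandra-dmytrenko/MicroservicePlanner | combining_small_timeseries/greedy-algorithm.py | balance_loads
-- ===== SOURCE A (Python) =====
-- def balance_loads(time_series, num_groups):
--     # Перетворюємо часові ряди в суми навантажень
--     loads = [sum(series) for series in time_series]
--
--     # Сортуємо навантаження за спаданням
--     sorted_loads = sorted(enumerate(loads), key=lambda x: x[1], reverse=True)
--
--     # Створюємо групи
--     groups = [[] for _ in range(num_groups)]
--     group_sums = [0] * num_groups
--
--     # Розподіляємо навантаження
--     for idx, load in sorted_loads:
--         # Знаходимо групу з найменшою сумою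
--         min_sum_group = min(range(num_groups), key=lambda i: group_sums[i])
--
--         # Додаємо навантаження до цієї групи
--         groups[min_sum_group].append(idx)
--         group_sums[min_sum_group] += load
--
--     return groups, group_sums
-- ===== SOURCE B (Python) =====
-- def _reinsert(heap, entry):
--     # insert entry into the ascending (sum, group) list, keeping it sorted
--     i = 0
--     while i < len(heap) and heap[i] < entry:
--         i += 1
--     heap.insert(i, entry)
--     return heap
--
--
-- def balance_loads(time_series, num_groups):
--     # Keep the groups in a list sorted ascending by (sum, group index): the
--     # least-loaded group is always at the head, so no per-item scan of all
--     # group sums is needed.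
--     loads = [sum(series) for series in time_series]
--     groups = [[] for _ in range(num_groups)]
--     heap = [(0, g) for g in range(num_groups)]
--     for idx, load in sorted(enumerate(loads), key=lambda x: x[1], reverse=True):
--         s, g = heap[0]
--         heap = _reinsert(heap[1:], (s + load, g))
--         groups[g].append(idx)
--     group_sums = [s for s, g in sorted(heap, key=lambda e: e[1])]
--     return groups, group_sums
-- ===== Notes on version B (the rewrite author's own statement) =====
-- stated objective: alternative
-- what changed: A rescans all num_groups group sums with min(range(num_groups), key=...) for every item; B instead keeps the groups in a list of (sum, group_index) pairs maintained in sorted ascending order, so the least-loaded group is always the head, and reconstructs group_sums at the end by sorting the pairs back by group index.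
-- outside the precondition, e.g. on balance_loads([[1]], 0): A raises ValueError, B raises IndexError
import Mathlib
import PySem

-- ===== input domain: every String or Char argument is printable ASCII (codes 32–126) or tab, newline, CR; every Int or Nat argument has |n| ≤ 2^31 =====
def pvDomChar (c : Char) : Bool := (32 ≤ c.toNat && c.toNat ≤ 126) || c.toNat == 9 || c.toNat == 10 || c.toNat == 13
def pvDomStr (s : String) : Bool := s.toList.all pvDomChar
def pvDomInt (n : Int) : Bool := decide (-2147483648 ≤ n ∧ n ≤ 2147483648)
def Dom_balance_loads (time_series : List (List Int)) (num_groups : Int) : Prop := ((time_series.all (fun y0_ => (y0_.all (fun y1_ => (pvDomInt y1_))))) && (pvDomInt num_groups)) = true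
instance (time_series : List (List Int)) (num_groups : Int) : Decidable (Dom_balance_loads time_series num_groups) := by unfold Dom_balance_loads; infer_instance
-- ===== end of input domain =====

-- B replaces A's per-item linear scan for the least-loaded group by a list of
-- (group_sum, group_index) pairs kept sorted ascending, whose head is always the
-- least-loaded group (objective: alternative data structure, same exact output).

-- ===== PORT A =====
def pvSum (s : List Int) : Int := s.foldl (· + ·) 0

-- body of A's 'for idx, load in sorted_loads' loop; state = (groups, group_sums)
def pvStepA (num_groups : Int) (st : List (List Int) × List Int) (p : Int × Int) :
    List (List Int) × List Int :=
  match PySem.List.min? (PySem.List.pyRange 0 num_groups 1)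
      (fun i => PySem.List.pyGetD st.2 i 0) with
  | none => st  -- Python's min(range(num_groups), …) raises ValueError here; outside Pre_
  | some g =>
      (st.1.set g.toNat (PySem.List.pyGetD st.1 g [] ++ [p.1]),
       st.2.set g.toNat (PySem.List.pyGetD st.2 g 0 + p.2))

def balance_loads (time_series : List (List Int)) (num_groups : Int) :
    List (List Int) × List Int :=
  let loads := time_series.map pvSum
  let sorted_loads := PySem.List.sorted (PySem.List.enumerate loads) (fun x => x.2) true
  let groups : List (List Int) := (PySem.List.pyRange 0 num_groups 1).map (fun _ => [])
  let group_sums : List Int := PySem.List.pyRepeat [0] num_groups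
  sorted_loads.foldl (pvStepA num_groups) (groups, group_sums)

-- ===== PORT B =====
-- Python tuple comparison (s1,g1) < (s2,g2): lexicographic on ints (exact)
def pvPairLt (p q : Int × Int) : Bool := p.1 < q.1 || (p.1 == q.1 && p.2 < q.2)

-- the 'while i < len(heap) and heap[i] < entry: i += 1' scan of _reinsert
def pvInsPos : List (Int × Int) → (Int × Int) → Nat
  | [], _ => 0
  | h :: t, e => if pvPairLt h e then pvInsPos t e + 1 else 0

-- _reinsert: heap.insert(i, entry) at the scanned position
def pvReinsert (heap : List (Int × Int)) (e : Int × Int) : List (Int × Int) :=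
  PySem.List.insert heap (pvInsPos heap e : Int) e

-- body of B's loop; state = (groups, heap); 's, g = heap[0]' raises IndexError on
-- the empty heap (outside Pre_), and heap[1:] of a nonempty heap is its tail
def pvStepB (st : List (List Int) × List (Int × Int)) (p : Int × Int) :
    List (List Int) × List (Int × Int) :=
  match st.2 with
  | [] => st
  | (s, g) :: rest =>
      (st.1.set g.toNat (PySem.List.pyGetD st.1 g [] ++ [p.1]),
       pvReinsert rest (s + p.2, g))

def balance_loads_alt (time_series : List (List Int)) (num_groups : Int) :
    List (List Int) × List Int :=
  let loads := time_series.map pvSum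
  let groups : List (List Int) := (PySem.List.pyRange 0 num_groups 1).map (fun _ => [])
  let heap : List (Int × Int) := (PySem.List.pyRange 0 num_groups 1).map (fun g => (0, g))
  let st := (PySem.List.sorted (PySem.List.enumerate loads) (fun x => x.2) true).foldl
      pvStepB (groups, heap)
  (st.1, (PySem.List.sorted st.2 (fun e => e.2) false).map (fun e => e.1))

-- ===== PRECONDITION & SPEC =====
-- Pre_ excludes exactly the inputs where A raises: num_groups ≤ 0 with a nonempty
-- time_series makes A's min(range(num_groups), …) raise ValueError (B's heap[0]
-- raises IndexError there too).
def Pre_balance_loads (time_series : List (List Int)) (num_groups : Int) : Prop :=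
  time_series = [] ∨ 0 < num_groups
instance (time_series : List (List Int)) (num_groups : Int) :
    Decidable (Pre_balance_loads time_series num_groups) := by
  unfold Pre_balance_loads; infer_instance

def pvWitness_balance_loads : List (List Int) × Int := ([[1, 2], [3], [4, -1]], 2)

def Spec_balance_loads (time_series : List (List Int)) (num_groups : Int)
    (out : List (List Int) × List Int) : Prop := out = balance_loads_alt time_series num_groups
instance (time_series : List (List Int)) (num_groups : Int) (out : List (List Int) × List Int) :
    Decidable (Spec_balance_loads time_series num_groups out) := by
  unfold Spec_balance_loads; infer_instance

-- ===== CLAIM (what is proved, stated in full; the proofs are below) =====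
def Claim_equal_balance_loads : Prop := ∀ (time_series : List (List Int)) (num_groups : Int), Dom_balance_loads time_series num_groups → Pre_balance_loads time_series num_groups → Spec_balance_loads time_series num_groups (balance_loads time_series num_groups)

-- ===== LEMMAS AND PROOFS =====

-- the strict lexicographic order behind pvPairLt, as a Prop
def pvLexLt (p q : Int × Int) : Prop := p.1 < q.1 ∨ (p.1 = q.1 ∧ p.2 < q.2)

theorem pvPairLt_iff (p q : Int × Int) : pvPairLt p q = true ↔ pvLexLt p q := by
  simp [pvPairLt, pvLexLt]

theorem pvLexLt_trans {p q r : Int × Int} (h1 : pvLexLt p q) (h2 : pvLexLt q r) :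
    pvLexLt p r := by
  rcases h1 with h1 | ⟨h1, h1'⟩ <;> rcases h2 with h2 | ⟨h2, h2'⟩ <;>
    simp [pvLexLt] <;> omega

theorem pvLexLt_total_of_ne {p q : Int × Int} (h : p.2 ≠ q.2) :
    pvLexLt p q ∨ pvLexLt q p := by
  unfold pvLexLt; omega

-- the loop invariant tying A's group_sums to B's heap
def pvInv (k : Int) (sums : List Int) (heap : List (Int × Int)) : Prop :=
  heap.Pairwise pvLexLt ∧ (heap.map Prod.snd).Nodup ∧
  (∀ x ∈ heap, 0 ≤ x.2 ∧ x.2 < k ∧ x.1 = PySem.List.pyGetD sums x.2 0) ∧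
  heap.length = k.toNat ∧ sums.length = k.toNat

-- ---- pvReinsert structure ----
theorem pvInsPos_le (l : List (Int × Int)) (e : Int × Int) : pvInsPos l e ≤ l.length := by
  induction l with
  | nil => simp [pvInsPos]
  | cons h t ih => simp only [pvInsPos, List.length_cons]; split <;> omega

theorem pvReinsert_eq (l : List (Int × Int)) (e : Int × Int) :
    pvReinsert l e = l.take (pvInsPos l e) ++ e :: l.drop (pvInsPos l e) := by
  unfold pvReinsert
  exact PySem.List.insert_natCast l (pvInsPos l e) e (pvInsPos_le l e)

theorem pvReinsert_nil (e : Int × Int) : pvReinsert [] e = [e] := by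
  simp [pvReinsert_eq, pvInsPos]

theorem pvReinsert_cons (h e : Int × Int) (t : List (Int × Int)) :
    pvReinsert (h :: t) e =
      if pvPairLt h e then h :: pvReinsert t e else e :: h :: t := by
  by_cases hlt : pvPairLt h e <;>
    simp [pvReinsert_eq, pvInsPos, hlt]

theorem pvReinsert_perm (l : List (Int × Int)) (e : Int × Int) :
    (pvReinsert l e).Perm (e :: l) := by
  rw [pvReinsert_eq]
  calc (l.take (pvInsPos l e) ++ e :: l.drop (pvInsPos l e)).Perm
        (e :: (l.take (pvInsPos l e) ++ l.drop (pvInsPos l e))) := List.perm_middle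
    _ = e :: l := by rw [List.take_append_drop]

theorem pvReinsert_pairwise (l : List (Int × Int)) (e : Int × Int)
    (hp : l.Pairwise pvLexLt) (hcmp : ∀ x ∈ l, x.2 ≠ e.2) :
    (pvReinsert l e).Pairwise pvLexLt := by
  induction l with
  | nil => simp [pvReinsert_nil, pvLexLt]
  | cons h t ih =>
    rw [pvReinsert_cons]
    rcases List.pairwise_cons.mp hp with ⟨hh, ht⟩
    by_cases hlt : pvPairLt h e
    · simp only [hlt, if_true]
      refine List.pairwise_cons.mpr ⟨?_, ih ht (fun x hx => hcmp x (List.mem_cons_of_mem _ hx))⟩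
      intro x hx
      have := (pvReinsert_perm t e).mem_iff.mp hx
      rcases List.mem_cons.mp this with rfl | hx'
      · exact (pvPairLt_iff h x).mp hlt
      · exact hh x hx'
    · simp only [hlt, Bool.false_eq_true, if_false]
      have heh : pvLexLt e h := by
        rcases pvLexLt_total_of_ne (hcmp h (List.mem_cons_self)) with h1 | h1
        · exact absurd ((pvPairLt_iff h e).mpr h1) hlt
        · exact h1
      refine List.pairwise_cons.mpr ⟨?_, hp⟩
      intro x hx
      rcases List.mem_cons.mp hx with rfl | hx'
      · exact heh
      · exact pvLexLt_trans heh (hh x hx')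

-- ---- min? characterisation: first minimum ----
def pvMinStep {α κ : Type} [LinearOrder κ] (key : α → κ) (acc : Option α) (x : α) :
    Option α :=
  match acc with
  | none => some x
  | some m => if key x < key m then some x else some m

theorem pvMin?_eq_foldl {α κ : Type} [LinearOrder κ] (key : α → κ) (xs : List α) :
    PySem.List.min? xs key = xs.foldl (pvMinStep key) none := rfl

theorem pvMinFold_lt {α κ : Type} [LinearOrder κ] (key : α → κ) (m : α) :
    ∀ (l : List α) (acc : Option α),
      (acc = none ∨ ∃ z, acc = some z ∧ key m < key z) →
      (∀ y ∈ l, key m < key y) →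
      (l.foldl (pvMinStep key) acc = none ∨
        ∃ z, l.foldl (pvMinStep key) acc = some z ∧ key m < key z) := by
  intro l
  induction l with
  | nil => intro acc hacc _; exact hacc
  | cons y t ih =>
    intro acc hacc hl
    simp only [List.foldl_cons]
    apply ih
    · rcases hacc with rfl | ⟨z, rfl, hz⟩
      · exact Or.inr ⟨y, rfl, hl y (List.mem_cons_self)⟩
      · by_cases hyz : key y < key z
        · exact Or.inr ⟨y, by simp [pvMinStep, hyz], hl y (List.mem_cons_self)⟩
        · exact Or.inr ⟨z, by simp [pvMinStep, hyz], hz⟩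
    · exact fun x hx => hl x (List.mem_cons_of_mem _ hx)

theorem pvMinFold_keep {α κ : Type} [LinearOrder κ] (key : α → κ) (m : α) :
    ∀ (l : List α), (∀ y ∈ l, ¬ key y < key m) →
      l.foldl (pvMinStep key) (some m) = some m := by
  intro l
  induction l with
  | nil => intro _; rfl
  | cons y t ih =>
    intro hl
    simp only [List.foldl_cons, pvMinStep, hl y (List.mem_cons_self), if_false]
    exact ih (fun x hx => hl x (List.mem_cons_of_mem _ hx))

theorem pvMin?_first {α κ : Type} [LinearOrder κ] (key : α → κ) (l1 l2 : List α) (m : α)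
    (h1 : ∀ y ∈ l1, key m < key y) (h2 : ∀ y ∈ l2, ¬ key y < key m) :
    PySem.List.min? (l1 ++ m :: l2) key = some m := by
  rw [pvMin?_eq_foldl, List.foldl_append, List.foldl_cons]
  rcases pvMinFold_lt key m l1 none (Or.inl rfl) h1 with hn | ⟨z, hz, hmz⟩
  · rw [hn]; exact pvMinFold_keep key m l2 h2
  · rw [hz]
    simp only [pvMinStep, hmz, if_true]
    exact pvMinFold_keep key m l2 h2

-- ---- membership structure of the heap ----
theorem pvHeap_snd_perm {k : Int} {sums : List Int} {heap : List (Int × Int)}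
    (hInv : pvInv k sums heap) :
    (heap.map Prod.snd).Perm (PySem.List.pyRange 0 k 1) := by
  obtain ⟨_, hnd, hmem, hlen, _⟩ := hInv
  apply List.Subperm.perm_of_length_le
  · apply List.subperm_of_subset hnd
    intro i hi
    rcases List.mem_map.mp hi with ⟨x, hx, rfl⟩
    exact PySem.List.mem_pyRange_one.mpr ⟨(hmem x hx).1, (hmem x hx).2.1⟩
  · simp [PySem.List.length_pyRange_one, hlen]

theorem pvHeap_exists {k : Int} {sums : List Int} {heap : List (Int × Int)}
    (hInv : pvInv k sums heap) {i : Int} (h0 : 0 ≤ i) (hk : i < k) :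
    ∃ x ∈ heap, x.2 = i := by
  have : i ∈ heap.map Prod.snd :=
    (pvHeap_snd_perm hInv).mem_iff.mpr (PySem.List.mem_pyRange_one.mpr ⟨h0, hk⟩)
  rcases List.mem_map.mp this with ⟨x, hx, hxi⟩
  exact ⟨x, hx, hxi⟩

-- the head of the sorted heap is exactly A's argmin
theorem pvArgmin {k : Int} {sums : List Int} {s g : Int} {rest : List (Int × Int)}
    (hInv : pvInv k sums ((s, g) :: rest)) :
    PySem.List.min? (PySem.List.pyRange 0 k 1) (fun i => PySem.List.pyGetD sums i 0)
      = some g := by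
  obtain ⟨hpw, hnd, hmem, hlen, hslen⟩ := hInv
  obtain ⟨hg0', hgk', hs'⟩ := hmem (s, g) (List.mem_cons_self)
  have hg0 : (0 : Int) ≤ g := hg0'
  have hgk : g < k := hgk'
  have hs : s = PySem.List.pyGetD sums g 0 := hs'
  have hhead : ∀ x ∈ rest, pvLexLt (s, g) x := (List.pairwise_cons.mp hpw).1
  have hother : ∀ i, 0 ≤ i → i < k → i ≠ g →
      pvLexLt (s, g) (PySem.List.pyGetD sums i 0, i) := by
    intro i h0 hik hig
    obtain ⟨x, hx, hxi⟩ := pvHeap_exists ⟨hpw, hnd, hmem, hlen, hslen⟩ h0 hik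
    have hxr : x ∈ rest := by
      rcases List.mem_cons.mp hx with rfl | hr
      · exact absurd hxi.symm (by simpa using hig)
      · exact hr
    have hxval : x = (PySem.List.pyGetD sums i 0, i) := by
      obtain ⟨_, _, hv⟩ := hmem x hx
      rw [← hxi, ← hv]
    rw [← hxval]
    exact hhead x hxr
  have hsplit : PySem.List.pyRange 0 k 1 =
      PySem.List.pyRange 0 g 1 ++ g :: PySem.List.pyRange (g + 1) k 1 := by
    rw [PySem.List.pyRange_one_append 0 g k hg0 (le_of_lt hgk),
        PySem.List.pyRange_one_cons hgk]
  rw [hsplit]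
  apply pvMin?_first
  · intro y hy
    rcases PySem.List.mem_pyRange_one.mp hy with ⟨hy0, hyg⟩
    have h := hother y hy0 (lt_trans hyg hgk) (ne_of_lt hyg)
    unfold pvLexLt at h
    simp only at h ⊢
    omega
  · intro y hy
    rcases PySem.List.mem_pyRange_one.mp hy with ⟨hy0, hyk⟩
    have h := hother y (by omega) hyk (by omega)
    unfold pvLexLt at h
    simp only at h ⊢
    omega

-- getD through set
theorem pvGetD_set_self {sums : List Int} {g : Int} (v : Int)
    (h0 : 0 ≤ g) (hlt : g < (sums.length : Int)) :
    PySem.List.pyGetD (sums.set g.toNat v) g 0 = v := by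
  have h1 : g < (((sums.set g.toNat v).length : Nat) : Int) := by
    rw [List.length_set]; exact hlt
  rw [PySem.List.pyGetD_eq_getElem _ _ h0 h1, List.getElem_set]
  simp

theorem pvGetD_set_ne {sums : List Int} {g i : Int} (v : Int) (hg0 : 0 ≤ g)
    (h0 : 0 ≤ i) (hlt : i < (sums.length : Int)) (hne : i ≠ g) :
    PySem.List.pyGetD (sums.set g.toNat v) i 0 = PySem.List.pyGetD sums i 0 := by
  have h1 : i < (((sums.set g.toNat v).length : Nat) : Int) := by
    rw [List.length_set]; exact hlt
  rw [PySem.List.pyGetD_eq_getElem _ _ h0 h1,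
      PySem.List.pyGetD_eq_getElem _ _ h0 hlt, List.getElem_set, if_neg (by omega)]

-- one loop step: same groups update, invariant re-established
theorem pvStep_eq {k : Int} {sums : List Int} {s g : Int} {rest : List (Int × Int)}
    (hInv : pvInv k sums ((s, g) :: rest)) (gr : List (List Int)) (p : Int × Int) :
    pvStepA k (gr, sums) p =
      (gr.set g.toNat (PySem.List.pyGetD gr g [] ++ [p.1]), sums.set g.toNat (s + p.2)) ∧
    pvStepB (gr, (s, g) :: rest) p =
      (gr.set g.toNat (PySem.List.pyGetD gr g [] ++ [p.1]), pvReinsert rest (s + p.2, g)) ∧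
    pvInv k (sums.set g.toNat (s + p.2)) (pvReinsert rest (s + p.2, g)) := by
  obtain ⟨hpw, hnd, hmem, hlen, hslen⟩ := hInv
  obtain ⟨hg0', hgk', hs'⟩ := hmem (s, g) (List.mem_cons_self)
  have hg0 : (0 : Int) ≤ g := hg0'
  have hgk : g < k := hgk'
  have hs : s = PySem.List.pyGetD sums g 0 := hs'
  have hglen : g < (sums.length : Int) := by
    rw [hslen]; omega
  have hnd' : g ∉ rest.map Prod.snd ∧ (rest.map Prod.snd).Nodup := by
    rw [← List.nodup_cons]
    simpa using hnd
  have hrest_ne : ∀ x ∈ rest, x.2 ≠ g := by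
    intro x hx hxg
    exact hnd'.1 (by rw [← hxg]; exact List.mem_map.mpr ⟨x, hx, rfl⟩)
  refine ⟨?_, ?_, ?_⟩
  · unfold pvStepA
    rw [pvArgmin ⟨hpw, hnd, hmem, hlen, hslen⟩]
    simp only [← hs]
  · rfl
  · have hperm := pvReinsert_perm rest (s + p.2, g)
    refine ⟨?_, ?_, ?_, ?_, ?_⟩
    · exact pvReinsert_pairwise rest (s + p.2, g) (List.pairwise_cons.mp hpw).2 hrest_ne
    · refine (hperm.map Prod.snd).nodup_iff.mpr ?_
      simpa using hnd
    · intro x hx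
      rcases List.mem_cons.mp (hperm.mem_iff.mp hx) with rfl | hxr
      · exact ⟨hg0, hgk, (pvGetD_set_self _ hg0 hglen).symm⟩
      · obtain ⟨hx0, hxk, hxv⟩ := hmem x (List.mem_cons_of_mem _ hxr)
        refine ⟨hx0, hxk, ?_⟩
        rw [pvGetD_set_ne _ hg0 hx0 (by rw [hslen]; omega) (hrest_ne x hxr), hxv]
    · rw [hperm.length_eq]
      simpa using hlen
    · simpa using hslen

-- the whole loop preserves the invariant and produces the same groups
theorem pvLoop_eq {k : Int} (hk : 0 < k) :
    ∀ (L : List (Int × Int)) (gr : List (List Int)) (sums : List Int)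
      (heap : List (Int × Int)), pvInv k sums heap →
      (L.foldl pvStepB (gr, heap)).1 = (L.foldl (pvStepA k) (gr, sums)).1 ∧
      pvInv k (L.foldl (pvStepA k) (gr, sums)).2 (L.foldl pvStepB (gr, heap)).2 := by
  intro L
  induction L with
  | nil => intro gr sums heap hInv; exact ⟨rfl, hInv⟩
  | cons p t ih =>
    intro gr sums heap hInv
    obtain ⟨s, g, rest, rfl⟩ : ∃ s g rest, heap = (s, g) :: rest := by
      match heap with
      | [] =>
        exfalso
        have := hInv.2.2.2.1
        simp at this
        omega
      | (s, g) :: rest => exact ⟨s, g, rest, rfl⟩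
    obtain ⟨hA, hB, hInv'⟩ := pvStep_eq hInv gr p
    simp only [List.foldl_cons, hA, hB]
    exact ih _ _ _ hInv'

-- final extraction: sorting the heap by group index recovers A's group_sums
theorem pvExtract {k : Int} {sums : List Int} {heap : List (Int × Int)}
    (hInv : pvInv k sums heap) :
    (PySem.List.sorted heap (fun e => e.2) false).map (fun e => e.1) = sums := by
  obtain ⟨hpw, hnd, hmem, hlen, hslen⟩ := hInv
  have hrange : PySem.List.pyRange 0 k 1 = PySem.List.pyRange 0 (sums.length : Int) 1 := by
    by_cases hk : 0 < k
    · congr 1; omega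
    · rw [PySem.List.pyRange_one_eq_nil (by omega),
          PySem.List.pyRange_one_eq_nil (by omega : (sums.length : Int) ≤ 0)]
  have hheap : heap = (heap.map Prod.snd).map
      (fun i => (PySem.List.pyGetD sums i 0, i)) := by
    rw [List.map_map]
    conv_lhs => rw [← List.map_id heap]
    apply List.map_congr_left
    intro x hx
    obtain ⟨_, _, hv⟩ := hmem x hx
    simp [Function.comp, ← hv]
  have hperm : ((PySem.List.pyRange 0 (sums.length : Int) 1).map
      (fun i => (PySem.List.pyGetD sums i 0, i))).Perm heap := by
    conv_rhs => rw [hheap]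
    exact (List.Perm.map _ ((pvHeap_snd_perm ⟨hpw, hnd, hmem, hlen, hslen⟩).trans
      (by rw [hrange]))).symm
  rw [PySem.List.sorted_eq_of_perm_of_pairwise_lt heap _ _ hperm ?_]
  · rw [List.map_map]
    exact PySem.List.map_pyGetD_pyRange_zero' sums 0
  · exact List.Pairwise.map _ (fun a b h => h) (PySem.List.pairwise_lt_pyRange_one 0 _)

-- the initial states satisfy the invariant (any k)
theorem pvInit (k : Int) :
    pvInv k (PySem.List.pyRepeat [0] k)
      ((PySem.List.pyRange 0 k 1).map (fun g => (0, g))) := by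
  rw [PySem.List.pyRepeat_singleton]
  refine ⟨?_, ?_, ?_, ?_, ?_⟩
  · exact List.Pairwise.map _ (fun a b h => Or.inr ⟨rfl, h⟩)
      (PySem.List.pairwise_lt_pyRange_one 0 k)
  · have : ((PySem.List.pyRange 0 k 1).map (fun g => ((0 : Int), g))).map Prod.snd
        = PySem.List.pyRange 0 k 1 := by simp
    rw [this]
    exact PySem.List.nodup_pyRange_one 0 k
  · intro x hx
    rcases List.mem_map.mp hx with ⟨g, hg, rfl⟩
    rcases PySem.List.mem_pyRange_one.mp hg with ⟨h0, hk⟩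
    refine ⟨h0, hk, ?_⟩
    rw [PySem.List.pyGetD_of_nonneg _ _ h0]
    rw [List.getD_eq_getElem?_getD]
    have : g.toNat < k.toNat := by omega
    simp [this]
  · simp [PySem.List.length_pyRange_one]
  · simp

-- ===== VERDICT (by name: the statement is the Claim_ definition above) =====
theorem balance_loads_spec : Claim_equal_balance_loads := by
  intro ts k _ hpre
  unfold Spec_balance_loads balance_loads balance_loads_alt
  by_cases hk : 0 < k
  · obtain ⟨hgr, hInv⟩ := pvLoop_eq hk
      (PySem.List.sorted (PySem.List.enumerate (ts.map pvSum)) (fun x => x.2) true)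
      ((PySem.List.pyRange 0 k 1).map (fun _ => []))
      (PySem.List.pyRepeat [0] k)
      ((PySem.List.pyRange 0 k 1).map (fun g => (0, g))) (pvInit k)
    simp only []
    refine Prod.ext ?_ ?_
    · exact hgr.symm
    · exact (pvExtract hInv).symm
  · rcases hpre with rfl | hpre
    · simp only [List.map_nil, PySem.List.enumerate]
      have hnil : PySem.List.sorted ([] : List (Int × Int)) (fun x => x.2) true = [] := rfl
      rw [hnil]
      simp only [List.foldl_nil]
      refine Prod.ext rfl ?_
      exact (pvExtract (pvInit k)).symm
    · omega
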